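-- pv_equiv track=rewrite | github.com/PacteraEDGE-UIF-Tool/datacompy | dependency analysis/prefixspan_test.py | gen_2d_array_with_rand_list
-- ===== SOURCE A (Python) =====
-- def gen_2d_array_with_rand_list(tokens, rand_list):
--     two_d_array=[]
--     array=[]
--     count=0
--     for rand_val in rand_list:
--         array.extend(tokens[count:count+rand_val])
--         two_d_array.append(array)
--         array=[]
--         count+=rand_val
--     return two_d_array
-- ===== SOURCE B (Python) =====
-- def gen_2d_array_with_rand_list(tokens, rand_list):
--     bounds = [0]
--     for r in rand_list:
--         bounds.append(bounds[-1] + r)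
--     return [list(tokens[a:b]) for a, b in zip(bounds, bounds[1:])]
-- ===== Notes on version B (the rewrite author's own statement) =====
-- stated objective: idiomatic
-- what changed: B first builds the list of chunk boundaries by prefix-summing rand_list, then produces every chunk in one comprehension over zip(bounds, bounds[1:]), replacing A's single loop that mutates a running count and extends a temporary array it then appends.
import Mathlib
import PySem

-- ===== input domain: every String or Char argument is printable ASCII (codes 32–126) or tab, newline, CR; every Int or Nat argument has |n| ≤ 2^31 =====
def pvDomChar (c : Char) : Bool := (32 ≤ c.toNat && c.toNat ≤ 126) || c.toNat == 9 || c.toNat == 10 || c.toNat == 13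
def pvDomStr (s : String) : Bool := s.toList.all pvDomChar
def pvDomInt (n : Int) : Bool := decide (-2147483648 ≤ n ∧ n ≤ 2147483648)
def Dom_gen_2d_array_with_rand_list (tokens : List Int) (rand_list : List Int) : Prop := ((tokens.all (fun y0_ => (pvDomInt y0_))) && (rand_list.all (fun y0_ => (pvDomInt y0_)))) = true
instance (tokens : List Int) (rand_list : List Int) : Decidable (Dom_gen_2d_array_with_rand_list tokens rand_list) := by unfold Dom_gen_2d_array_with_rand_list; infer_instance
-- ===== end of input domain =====

-- B computes all chunk boundaries by prefix-summing rand_list and slices once per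
-- boundary pair, replacing A's mutating count/temp-array loop (objective: idiomatic).

-- ===== PORT A =====
-- state: (two_d_array so far, count); array is built by one extend from [] and appended.
def gen_2d_array_with_rand_list (tokens : List Int) (rand_list : List Int) : List (List Int) :=
  (rand_list.foldl
    (fun (st : List (List Int) × Int) rand_val =>
      (st.1 ++ [[] ++ PySem.List.slice tokens (some st.2) (some (st.2 + rand_val))],
       st.2 + rand_val))
    ([], 0)).1

-- ===== PORT B =====
-- bounds[-1] is the last element; bounds starts as [0] and only grows, so getLastD's
-- default is never used (Python's bounds[-1] cannot raise here).
def gen_2d_array_with_rand_list_alt (tokens : List Int) (rand_list : List Int) : List (List Int) :=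
  let bounds := rand_list.foldl (fun (bs : List Int) r => bs ++ [bs.getLastD 0 + r]) [0]
  (bounds.zip (PySem.List.slice bounds (some 1) none)).map
    (fun ab => PySem.List.slice tokens (some ab.1) (some ab.2))

-- ===== PRECONDITION & SPEC =====
def Spec_gen_2d_array_with_rand_list (tokens : List Int) (rand_list : List Int) (out : List (List Int)) : Prop := out = gen_2d_array_with_rand_list_alt tokens rand_list
instance (tokens : List Int) (rand_list : List Int) (out : List (List Int)) : Decidable (Spec_gen_2d_array_with_rand_list tokens rand_list out) := by unfold Spec_gen_2d_array_with_rand_list; infer_instance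

-- ===== CLAIM (what is proved, stated in full; the proofs are below) =====
def Claim_equal_gen_2d_array_with_rand_list : Prop := ∀ (tokens : List Int) (rand_list : List Int), Dom_gen_2d_array_with_rand_list tokens rand_list → Spec_gen_2d_array_with_rand_list tokens rand_list (gen_2d_array_with_rand_list tokens rand_list)

-- ===== LEMMAS AND PROOFS =====

-- the sequence of partial sums starting after c
def pvSums (c : Int) : List Int → List Int
  | [] => []
  | r :: rl => (c + r) :: pvSums (c + r) rl

-- the chunks A produces when its counter starts at c
def pvChunks (tokens : List Int) (c : Int) : List Int → List (List Int)
  | [] => []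
  | r :: rl => PySem.List.slice tokens (some c) (some (c + r)) :: pvChunks tokens (c + r) rl

lemma pv_foldA (tokens : List Int) (rl : List Int) (acc : List (List Int)) (c : Int) :
    (rl.foldl
      (fun (st : List (List Int) × Int) rand_val =>
        (st.1 ++ [[] ++ PySem.List.slice tokens (some st.2) (some (st.2 + rand_val))],
         st.2 + rand_val))
      (acc, c)).1 = acc ++ pvChunks tokens c rl := by
  induction rl generalizing acc c with
  | nil => simp [pvChunks]
  | cons r rl ih =>
    simp only [List.foldl_cons]
    rw [ih]
    simp [pvChunks]

lemma pv_foldB (rl : List Int) (bs : List Int) (c : Int) (hbs : bs ≠ []) (hlast : bs.getLastD 0 = c) :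
    rl.foldl (fun (bs : List Int) r => bs ++ [bs.getLastD 0 + r]) bs = bs ++ pvSums c rl := by
  induction rl generalizing bs c with
  | nil => simp [pvSums]
  | cons r rl ih =>
    simp only [List.foldl_cons, hlast, pvSums]
    rw [ih (bs ++ [c + r]) (c + r) (by simp) (by simp)]
    simp

lemma pv_zipmap (tokens : List Int) (rl : List Int) (c : Int) :
    ((c :: pvSums c rl).zip (pvSums c rl)).map
      (fun ab => PySem.List.slice tokens (some ab.1) (some ab.2)) = pvChunks tokens c rl := by
  induction rl generalizing c with
  | nil => simp [pvSums, pvChunks]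
  | cons r rl ih => simp [pvSums, pvChunks, ih]

-- ===== VERDICT (by name: the statement is the Claim_ definition above) =====
theorem gen_2d_array_with_rand_list_spec : Claim_equal_gen_2d_array_with_rand_list := by
  intro tokens rand_list _
  unfold Spec_gen_2d_array_with_rand_list gen_2d_array_with_rand_list gen_2d_array_with_rand_list_alt
  rw [pv_foldA tokens rand_list [] 0, pv_foldB rand_list [0] 0 (by simp) (by simp)]
  simp [PySem.List.slice_from_one, pv_zipmap tokens rand_list 0]
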